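-- pv_equiv track=rewrite | github.com/ravikumarpidintla/LP | projects/word_validator/generate_words.py | calculate_word_points
-- ===== SOURCE A (Python) =====
-- points_per_card = {
--     'A': 10, 'B': 2, 'C': 8, 'D': 6, 'E': 10, 'F': 2, 'G': 4, 'H': 8, 'I': 10, 'J': 6,
--     'K': 8, 'L': 8, 'M': 8, 'N': 8, 'O': 8, 'P': 8, 'Q': 4, 'R': 8, 'S': 8, 'T': 8,
--     'U': 8, 'V': 6, 'W': 8, 'X': 2, 'Y': 4, 'Z': 2, '*': 15  # Master card
-- }
--
-- def calculate_word_points(word):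
--     # Calculate total points for a given word based on points per card
--     total_points = 0
--     for letter in word:
--         if letter == '*':
--             total_points += 15
--         else:
--             total_points += points_per_card.get(letter, 0)
--     return total_points
-- ===== SOURCE B (Python) =====
-- # Closed tally by point value: group the letters by their score, count occurrences per group.
-- GROUPS = [(2, 'BFXZ'), (4, 'GQY'), (6, 'DJV'), (8, 'CHKLMNOPRSTUW'), (10, 'AEI'), (15, '*')]
--
-- def calculate_word_points(word):
--     letters = list(word)
--     return sum(pts * letters.count(c) for pts, group in GROUPS for c in group)
-- ===== Notes on version B (the rewrite author's own statement) =====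
-- stated objective: alternative
-- what changed: B inverts the table: it groups the letters by point value and returns sum over groups of pts * count(letter in word), replacing A's per-character dict-lookup accumulation (and its redundant '*' branch) with a count-per-score tally.
import Mathlib
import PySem

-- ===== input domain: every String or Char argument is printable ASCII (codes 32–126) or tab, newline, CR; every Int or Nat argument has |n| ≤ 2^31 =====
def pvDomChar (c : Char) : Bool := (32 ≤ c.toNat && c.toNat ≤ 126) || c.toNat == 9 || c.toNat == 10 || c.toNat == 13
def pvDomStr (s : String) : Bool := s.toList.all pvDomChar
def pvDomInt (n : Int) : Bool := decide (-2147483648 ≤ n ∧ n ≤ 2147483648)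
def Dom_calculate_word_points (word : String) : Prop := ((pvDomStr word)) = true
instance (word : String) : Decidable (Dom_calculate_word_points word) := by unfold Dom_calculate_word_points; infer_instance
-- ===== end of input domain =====

-- B inverts the table: it sums pts * (occurrence count in the word) over letters grouped
-- by point value, instead of A's per-character dict-lookup accumulation (objective: alternative).


-- module-level constant points_per_card (A's Python module)
def points_per_card : PySem.Dict Char Int := PySem.Dict.ofList
  [('A', 10), ('B', 2), ('C', 8), ('D', 6), ('E', 10), ('F', 2), ('G', 4), ('H', 8), ('I', 10), ('J', 6),
   ('K', 8), ('L', 8), ('M', 8), ('N', 8), ('O', 8), ('P', 8), ('Q', 4), ('R', 8), ('S', 8), ('T', 8),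
   ('U', 8), ('V', 6), ('W', 8), ('X', 2), ('Y', 4), ('Z', 2), ('*', 15)]

-- ===== PORT A =====
def calculate_word_points (word : String) : Int :=
  word.toList.foldl
    (fun total_points letter =>
      if letter = '*' then total_points + 15
      else total_points + points_per_card.getD letter 0) 0

-- ===== PORT B =====
-- module-level constant GROUPS (B's Python module)
def GROUPS : List (Int × List Char) :=
  [(2, ['B','F','X','Z']), (4, ['G','Q','Y']), (6, ['D','J','V']),
   (8, ['C','H','K','L','M','N','O','P','R','S','T','U','W']),
   (10, ['A','E','I']), (15, ['*'])]

def calculate_word_points_alt (word : String) : Int :=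
  let letters := word.toList
  (GROUPS.map (fun g =>
    (g.2.map (fun c => g.1 * (PySem.List.count letters c : Int))).sum)).sum

-- ===== PRECONDITION & SPEC =====
def Spec_calculate_word_points (word : String) (out : Int) : Prop := out = calculate_word_points_alt word
instance (word : String) (out : Int) : Decidable (Spec_calculate_word_points word out) := by unfold Spec_calculate_word_points; infer_instance

-- ===== CLAIM (what is proved, stated in full; the proofs are below) =====
def Claim_equal_calculate_word_points : Prop := ∀ (word : String), Dom_calculate_word_points word → Spec_calculate_word_points word (calculate_word_points word)

-- ===== LEMMAS AND PROOFS =====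

-- B's value on a char list, as a function of the list (unfolds calculate_word_points_alt).
def altCore (l : List Char) : Int :=
  (GROUPS.map (fun g => (g.2.map (fun c => g.1 * (PySem.List.count l c : Int))).sum)).sum

-- A's per-letter contribution ('*' branch folded into the dict, where it is already 15).
def aVal (c : Char) : Int := if c = '*' then 15 else points_per_card.getD c 0

-- points_per_card as a literal item list (ofList evaluated once, shared by the proofs below).
lemma pts_mk : points_per_card = PySem.Dict.mk
    [('A', (10:Int)), ('B', 2), ('C', 8), ('D', 6), ('E', 10), ('F', 2), ('G', 4), ('H', 8), ('I', 10), ('J', 6),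
     ('K', 8), ('L', 8), ('M', 8), ('N', 8), ('O', 8), ('P', 8), ('Q', 4), ('R', 8), ('S', 8), ('T', 8),
     ('U', 8), ('V', 6), ('W', 8), ('X', 2), ('Y', 4), ('Z', 2), ('*', 15)] := by rfl

-- B's table agrees with A's per-letter value: the one-hot sum over the groups picks out aVal x.
lemma table_eq (x : Char) : (GROUPS.map (fun g =>
    (g.2.map (fun c => g.1 * (if c = x then (1:Int) else 0))).sum)).sum = aVal x := by
  by_cases hx : x ∈ ['A','B','C','D','E','F','G','H','I','J','K','L','M',
                     'N','O','P','Q','R','S','T','U','V','W','X','Y','Z','*']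
  · fin_cases hx <;> rw [aVal, pts_mk] <;> rfl
  · have hget : points_per_card.get? x = none := by
      rw [pts_mk, PySem.Dict.get?_eq_none_iff_not_mem_keys]
      simpa using hx
    have hval : aVal x = 0 := by
      have hst : x ≠ '*' := by intro h; exact hx (by rw [h]; decide)
      rw [aVal, if_neg hst, PySem.Dict.getD_eq_get?_getD, hget]; rfl
    simp only [List.mem_cons, not_or] at hx
    obtain ⟨hA,hB,hC,hD,hE,hF,hG,hH,hI,hJ,hK,hL,hM,hN,hO,hP,hQ,hR,hS,hT,hU,hV,hW,hX,hY,hZ,hst,-⟩ := hx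
    rw [hval]
    simp only [GROUPS, List.map_cons, List.map_nil, List.sum_cons, List.sum_nil,
      if_neg (Ne.symm hA), if_neg (Ne.symm hB), if_neg (Ne.symm hC), if_neg (Ne.symm hD),
      if_neg (Ne.symm hE), if_neg (Ne.symm hF), if_neg (Ne.symm hG), if_neg (Ne.symm hH),
      if_neg (Ne.symm hI), if_neg (Ne.symm hJ), if_neg (Ne.symm hK), if_neg (Ne.symm hL),
      if_neg (Ne.symm hM), if_neg (Ne.symm hN), if_neg (Ne.symm hO), if_neg (Ne.symm hP),
      if_neg (Ne.symm hQ), if_neg (Ne.symm hR), if_neg (Ne.symm hS), if_neg (Ne.symm hT),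
      if_neg (Ne.symm hU), if_neg (Ne.symm hV), if_neg (Ne.symm hW), if_neg (Ne.symm hX),
      if_neg (Ne.symm hY), if_neg (Ne.symm hZ), if_neg (Ne.symm hst),
      mul_zero, add_zero]

-- Pushing one letter onto the word adds exactly that letter's point value to B's tally.
lemma altCore_cons (x : Char) (l : List Char) : altCore (x :: l) = aVal x + altCore l := by
  have hcnt : ∀ c : Char, (PySem.List.count (x :: l) c : Int)
      = (PySem.List.count l c : Int) + (if c = x then 1 else 0) := by
    intro c
    rcases eq_or_ne c x with h | h
    · subst h; simp [PySem.List.count_eq]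
    · simp [PySem.List.count_eq, h, Ne.symm h]
  simp only [altCore, hcnt, mul_add]
  calc (GROUPS.map (fun g => (g.2.map (fun c =>
          g.1 * (PySem.List.count l c : Int) + g.1 * (if c = x then (1:Int) else 0))).sum)).sum
      = (GROUPS.map (fun g => (g.2.map (fun c => g.1 * (PySem.List.count l c : Int))).sum)).sum
        + (GROUPS.map (fun g => (g.2.map (fun c => g.1 * (if c = x then (1:Int) else 0))).sum)).sum := by
        simp only [GROUPS, List.map_cons, List.map_nil, List.sum_cons, List.sum_nil]; ring
    _ = aVal x + altCore l := by rw [table_eq]; rw [altCore]; ring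

-- A's fold with any accumulator equals the accumulator plus B's tally of the remaining letters.
lemma foldA_eq (l : List Char) (acc : Int) :
    l.foldl (fun total_points letter =>
        if letter = '*' then total_points + 15
        else total_points + points_per_card.getD letter 0) acc
      = acc + altCore l := by
  induction l generalizing acc with
  | nil => simp [altCore, GROUPS, PySem.List.count_eq]
  | cons x xs ih =>
    rw [List.foldl_cons, ih, altCore_cons]
    by_cases h : x = '*' <;> simp [h, aVal] <;> ring

-- ===== VERDICT (by name: the statement is the Claim_ definition above) =====
theorem calculate_word_points_spec : Claim_equal_calculate_word_points := by
  intro word _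
  show calculate_word_points word = calculate_word_points_alt word
  simp only [calculate_word_points, calculate_word_points_alt]
  rw [foldA_eq]
  simp [altCore]
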